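-- pv_equiv track=rewrite | github.com/brackishmeadows/poemer | poemer.py | light_hygiene
-- ===== SOURCE A (Python) =====
-- function_words = {
--     "a","the","and","or","but","if","at","in","on","of","is","are","was","were",
--     "to","for","from","about","during","with"
-- }
--
-- rel_tokens = {"i","you","we","my","your","our","me","us"}
--
-- def light_hygiene(tokens):
--     cleaned = []
--     for w in tokens:
--         wr = w.rstrip(",")
--         if cleaned and cleaned[-1].rstrip(",") == wr:
--             continue
--         if cleaned and (cleaned[-1].rstrip(",") in function_words) and (wr in function_words):
--             continue
--         cleaned.append(w)
--
--     # strip edges (but don't strip if edge is relational)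
--     if cleaned and cleaned[0].rstrip(",") in function_words and cleaned[0].rstrip(",") not in rel_tokens:
--         cleaned = cleaned[1:]
--     if cleaned and cleaned[-1].rstrip(",") in function_words and cleaned[-1].rstrip(",") not in rel_tokens:
--         cleaned = cleaned[:-1]
--     return cleaned
-- ===== SOURCE B (Python) =====
-- function_words = {
--     "a","the","and","or","but","if","at","in","on","of","is","are","was","were",
--     "to","for","from","about","during","with"
-- }
--
-- rel_tokens = {"i","you","we","my","your","our","me","us"}
--
-- _START = object()  # sentinel: no predecessor
--
--
-- def _key(w):
--     # collapse key: all function words share one key (None), others their rstrip(",") form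
--     wr = w.rstrip(",")
--     return None if wr in function_words else wr
--
--
-- def light_hygiene(tokens):
--     keys = [_key(w) for w in tokens]
--     # keep a token exactly when its key differs from its predecessor's key
--     cleaned = [w for w, k, pk in zip(tokens, keys, [_START] + keys) if k != pk]
--     if cleaned and cleaned[0].rstrip(",") in function_words and cleaned[0].rstrip(",") not in rel_tokens:
--         cleaned = cleaned[1:]
--     if cleaned and cleaned[-1].rstrip(",") in function_words and cleaned[-1].rstrip(",") not in rel_tokens:
--         cleaned = cleaned[:-1]
--     return cleaned
-- ===== Notes on version B (the rewrite author's own statement) =====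
-- stated objective: idiomatic
-- what changed: A's look-back-against-last-kept accumulator loop is replaced by precomputing a collapse key per token (a shared sentinel for function words, else the comma-stripped form) and keeping exactly the tokens whose key differs from their predecessor's, via one zip/filter comprehension; the edge strips are unchanged.
import Mathlib
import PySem

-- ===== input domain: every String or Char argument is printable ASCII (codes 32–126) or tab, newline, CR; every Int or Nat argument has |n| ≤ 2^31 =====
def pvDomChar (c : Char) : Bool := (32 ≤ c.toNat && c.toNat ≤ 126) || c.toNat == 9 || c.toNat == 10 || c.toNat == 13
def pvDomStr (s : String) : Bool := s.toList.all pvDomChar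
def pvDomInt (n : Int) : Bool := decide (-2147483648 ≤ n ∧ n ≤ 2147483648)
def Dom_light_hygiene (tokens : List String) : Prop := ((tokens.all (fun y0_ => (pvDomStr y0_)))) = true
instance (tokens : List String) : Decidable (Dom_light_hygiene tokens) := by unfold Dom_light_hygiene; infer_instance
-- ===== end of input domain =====

-- B replaces A's look-back-against-last-kept accumulator loop by a precomputed key list
-- and a single adjacent-key comparison comprehension (objective: idiomatic decomposition; same cost).

-- ===== PORT A =====
-- w.rstrip(",") ported by hand: drop trailing ',' characters (exact for this single-char strip set)
def rstripComma (w : String) : String :=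
  String.ofList ((w.toList.reverse.dropWhile (fun c => c == ',')).reverse)

-- module constant function_words (a Python set of distinct strings)
def pyFunctionWords : List String :=
  ["a","the","and","or","but","if","at","in","on","of","is","are","was","were",
   "to","for","from","about","during","with"]

-- module constant rel_tokens
def pyRelTokens : List String := ["i","you","we","my","your","our","me","us"]

-- the body of A's for-loop (the two 'continue' guards, then append)
def lhStep (cleaned : List String) (w : String) : List String :=
  let wr := rstripComma w
  if (match cleaned.getLast? with
      | some l => rstripComma l == wr
      | none => false) then cleaned
  else if (match cleaned.getLast? with
      | some l => pyFunctionWords.contains (rstripComma l) && pyFunctionWords.contains wr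
      | none => false) then cleaned
  else cleaned ++ [w]

def light_hygiene (tokens : List String) : List String :=
  let cleaned := tokens.foldl lhStep []
  let cleaned :=
    match cleaned.head? with
    | some h =>
        if pyFunctionWords.contains (rstripComma h) && !(pyRelTokens.contains (rstripComma h))
        then PySem.List.slice cleaned (some 1) none else cleaned
    | none => cleaned
  match cleaned.getLast? with
  | some l =>
      if pyFunctionWords.contains (rstripComma l) && !(pyRelTokens.contains (rstripComma l))
      then PySem.List.slice cleaned none (some (-1)) else cleaned
  | none => cleaned

-- ===== PORT B =====
-- _key: None for function words, else the rstrip(",") form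
def lhKey (w : String) : Option String :=
  let wr := rstripComma w
  if pyFunctionWords.contains wr then none else some wr

-- the _START sentinel becomes the outer 'none' of Option (Option String)
def light_hygiene_alt (tokens : List String) : List String :=
  let keys := tokens.map lhKey
  let cleaned :=
    ((tokens.zip (keys.zip ((none : Option (Option String)) :: keys.map some))).filter
        (fun p => some p.2.1 != p.2.2)).map (fun p => p.1)
  let cleaned :=
    match cleaned.head? with
    | some h =>
        if pyFunctionWords.contains (rstripComma h) && !(pyRelTokens.contains (rstripComma h))
        then PySem.List.slice cleaned (some 1) none else cleaned
    | none => cleaned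
  match cleaned.getLast? with
  | some l =>
      if pyFunctionWords.contains (rstripComma l) && !(pyRelTokens.contains (rstripComma l))
      then PySem.List.slice cleaned none (some (-1)) else cleaned
  | none => cleaned

-- ===== PRECONDITION & SPEC =====
def Spec_light_hygiene (tokens : List String) (out : List String) : Prop := out = light_hygiene_alt tokens
instance (tokens : List String) (out : List String) : Decidable (Spec_light_hygiene tokens out) := by unfold Spec_light_hygiene; infer_instance

-- ===== CLAIM (what is proved, stated in full; the proofs are below) =====
def Claim_equal_light_hygiene : Prop := ∀ (tokens : List String), Dom_light_hygiene tokens → Spec_light_hygiene tokens (light_hygiene tokens)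

-- ===== LEMMAS AND PROOFS =====

-- proof-only characterisation: collapse relative to the key of the last kept token
def lhDD (k : Option String) : List String → List String
  | [] => []
  | w :: rest => if lhKey w = k then lhDD k rest else w :: lhDD (lhKey w) rest

theorem lhStep_eq (acc : List String) (w w0 : String) (h : acc.getLast? = some w0) :
    lhStep acc w = if lhKey w = lhKey w0 then acc else acc ++ [w] := by
  unfold lhStep
  rw [h]
  by_cases h1 : rstripComma w0 = rstripComma w
  · simp [lhKey, h1]
  · by_cases h2 : rstripComma w0 ∈ pyFunctionWords
    · by_cases h3 : rstripComma w ∈ pyFunctionWords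
      · simp [lhKey, h1, h2, h3]
      · simp [lhKey, h1, h2, h3]
    · by_cases h3 : rstripComma w ∈ pyFunctionWords
      · simp [lhKey, h1, h2, h3]
      · simp [lhKey, h1, h2, h3, Ne.symm h1]

theorem foldA (ts : List String) : ∀ (acc : List String) (w0 : String),
    acc.getLast? = some w0 → ts.foldl lhStep acc = acc ++ lhDD (lhKey w0) ts := by
  induction ts with
  | nil => intro acc w0 _; simp [lhDD]
  | cons w rest ih =>
    intro acc w0 h
    rw [List.foldl_cons, lhStep_eq acc w w0 h]
    by_cases hk : lhKey w = lhKey w0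
    · rw [if_pos hk, ih acc w0 h]
      simp [lhDD, hk]
    · rw [if_neg hk, ih (acc ++ [w]) w (by simp)]
      simp [lhDD, hk]

theorem foldB (ts : List String) : ∀ (k : Option String),
    ((ts.zip ((ts.map lhKey).zip ((some k : Option (Option String)) :: (ts.map lhKey).map some))).filter
        (fun p => some p.2.1 != p.2.2)).map (fun p => p.1) = lhDD k ts := by
  induction ts with
  | nil => intro k; rfl
  | cons w rest ih =>
    intro k
    simp only [List.map_cons, List.zip_cons_cons, List.filter_cons, lhDD]
    by_cases hk : lhKey w = k
    · simp only [hk, bne_self_eq_false, Bool.false_eq_true, if_false]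
      simpa using ih k
    · have hb : (some (lhKey w) != some k) = true := by simp [hk]
      rw [hb, if_pos rfl, if_neg hk, List.map_cons]
      simpa using ih (lhKey w)

theorem cleaned_eq (tokens : List String) :
    tokens.foldl lhStep [] =
    ((tokens.zip ((tokens.map lhKey).zip ((none : Option (Option String)) :: (tokens.map lhKey).map some))).filter
        (fun p => some p.2.1 != p.2.2)).map (fun p => p.1) := by
  cases tokens with
  | nil => rfl
  | cons t ts =>
    have hstep : lhStep [] t = [t] := by unfold lhStep; simp
    have hA : (t :: ts).foldl lhStep [] = t :: lhDD (lhKey t) ts := by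
      rw [List.foldl_cons, hstep]
      simpa using foldA ts [t] t (by simp)
    rw [hA]
    simp only [List.map_cons, List.zip_cons_cons, List.filter_cons]
    have hb : ((some (lhKey t) : Option (Option String)) != none) = true := by simp
    rw [hb, if_pos rfl, List.map_cons]
    simpa using (foldB ts (lhKey t)).symm

-- ===== VERDICT (by name: the statement is the Claim_ definition above) =====
theorem light_hygiene_spec : Claim_equal_light_hygiene := by
  intro tokens _
  show light_hygiene tokens = light_hygiene_alt tokens
  unfold light_hygiene light_hygiene_alt
  rw [cleaned_eq]
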